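-- pv_equiv track=rewrite | github.com/yazid-hoblos/GNN-Sepsis | src/han/attention_analysis.py | _extract_node_type
-- ===== SOURCE A (Python) =====
-- def _extract_node_type(node_id: str) -> str:
--     """Extract node type from ID."""
--     prefixes = {
--         'Sample_': 'Sample',
--         'Protein_': 'Protein',
--         'Gene_': 'Gene',
--         'Pathway_': 'Pathway',
--         'GO_': 'GO_Term',
--         'Reaction_': 'Reaction',
--     }
--
--     for prefix, node_type in prefixes.items():
--         if node_id.startswith(prefix):
--             return node_type
--     return 'Entity'
-- ===== SOURCE B (Python) =====
-- _TABLE = {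
--     'Sample': 'Sample',
--     'Protein': 'Protein',
--     'Gene': 'Gene',
--     'Pathway': 'Pathway',
--     'GO': 'GO_Term',
--     'Reaction': 'Reaction',
-- }
--
--
-- def _extract_node_type(node_id: str) -> str:
--     """Extract node type from ID."""
--     head, sep, _ = node_id.partition('_')
--     if sep:
--         return _TABLE.get(head, 'Entity')
--     return 'Entity'
-- ===== Notes on version B (the rewrite author's own statement) =====
-- stated objective: simpler
-- what changed: Replaces the linear startswith scan over six prefixes by a single partition at the first underscore followed by one table lookup of the bare token.
import Mathlib
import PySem

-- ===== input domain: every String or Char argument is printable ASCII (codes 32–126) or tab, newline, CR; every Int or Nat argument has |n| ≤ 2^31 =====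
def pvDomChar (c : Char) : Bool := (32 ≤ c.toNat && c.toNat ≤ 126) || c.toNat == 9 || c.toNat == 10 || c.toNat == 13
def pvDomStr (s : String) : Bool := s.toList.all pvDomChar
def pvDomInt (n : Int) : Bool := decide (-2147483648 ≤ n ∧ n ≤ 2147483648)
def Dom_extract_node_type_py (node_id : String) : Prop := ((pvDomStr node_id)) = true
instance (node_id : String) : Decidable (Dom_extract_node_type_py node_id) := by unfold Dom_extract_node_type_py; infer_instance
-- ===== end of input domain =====

-- B replaces A's linear startswith scan over six prefixes by one partition at the
-- first underscore and a single table lookup of the bare token (objective: simpler).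

-- ===== PORT A =====
def extract_node_type_py (node_id : String) : String :=
  if PySem.Str.startswith node_id "Sample_" then "Sample"
  else if PySem.Str.startswith node_id "Protein_" then "Protein"
  else if PySem.Str.startswith node_id "Gene_" then "Gene"
  else if PySem.Str.startswith node_id "Pathway_" then "Pathway"
  else if PySem.Str.startswith node_id "GO_" then "GO_Term"
  else if PySem.Str.startswith node_id "Reaction_" then "Reaction"
  else "Entity"

-- ===== PORT B =====
-- hand port (exact) of the part of str.partition(node_id, '_') that B uses, for the
-- single-character separator '_': returns `some head` iff '_' occurs in the string
-- (Python: sep ≠ ''), `none` if '_' does not occur.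
def pvPartitionHead? : List Char → Option (List Char)
  | [] => none
  | c :: rest => if c = '_' then some [] else (pvPartitionHead? rest).map (c :: ·)

def pvTable : PySem.Dict String String :=
  PySem.Dict.mk [("Sample", "Sample"), ("Protein", "Protein"), ("Gene", "Gene"),
                 ("Pathway", "Pathway"), ("GO", "GO_Term"), ("Reaction", "Reaction")]

def extract_node_type_py_alt (node_id : String) : String :=
  match pvPartitionHead? node_id.toList with
  | some head => pvTable.getD (String.ofList head) "Entity"
  | none => "Entity"

-- ===== PRECONDITION & SPEC =====
def Spec_extract_node_type_py (node_id : String) (out : String) : Prop := out = extract_node_type_py_alt node_id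
instance (node_id : String) (out : String) : Decidable (Spec_extract_node_type_py node_id out) := by unfold Spec_extract_node_type_py; infer_instance

-- ===== CLAIM (what is proved, stated in full; the proofs are below) =====
def Claim_equal_extract_node_type_py : Prop := ∀ (node_id : String), Dom_extract_node_type_py node_id → Spec_extract_node_type_py node_id (extract_node_type_py node_id)

-- ===== LEMMAS AND PROOFS =====

-- A's startswith test for "p_" succeeds exactly when the first '_'-partition head is p.
lemma pvHead_iff (p : List Char) (hp : '_' ∉ p) (l : List Char) :
    (p ++ ['_']) <+: l ↔ pvPartitionHead? l = some p := by
  induction p generalizing l with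
  | nil =>
    cases l with
    | nil => simp [pvPartitionHead?]
    | cons c rest =>
      by_cases hc : c = '_'
      · subst hc; simp [pvPartitionHead?, List.cons_prefix_cons]
      · simp [pvPartitionHead?, hc, List.cons_prefix_cons, Ne.symm hc]
  | cons a p ih =>
    have ha : a ≠ '_' := by intro h; exact hp (h ▸ List.mem_cons_self)
    have hp' : '_' ∉ p := fun h => hp (List.mem_cons_of_mem _ h)
    cases l with
    | nil => simp [pvPartitionHead?]
    | cons c rest =>
      by_cases hc : c = '_'
      · subst hc
        simp [pvPartitionHead?, List.cons_prefix_cons]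
        intro h; exact absurd h ha
      · simp [pvPartitionHead?, hc, List.cons_prefix_cons, ih hp']
        constructor
        · rintro ⟨x, y⟩; exact ⟨y, x.symm⟩
        · rintro ⟨y, x⟩; exact ⟨x.symm, y⟩

lemma pvSw_none (s : String) (h : pvPartitionHead? s.toList = none)
    (p : List Char) (hp : '_' ∉ p) :
    PySem.Chars.startswith s.toList (p ++ ['_']) = false := by
  rw [← Bool.not_eq_true, PySem.Chars.startswith_iff, pvHead_iff p hp]
  simp [h]

lemma pvSw_some (s : String) (head : List Char) (h : pvPartitionHead? s.toList = some head)
    (p : List Char) (hp : '_' ∉ p) :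
    PySem.Chars.startswith s.toList (p ++ ['_']) = true ↔ p = head := by
  rw [PySem.Chars.startswith_iff, pvHead_iff p hp, h]
  simp [eq_comm]

-- ===== VERDICT (by name: the statement is the Claim_ definition above) =====
theorem extract_node_type_py_spec : Claim_equal_extract_node_type_py := by
  intro s _
  unfold Spec_extract_node_type_py extract_node_type_py extract_node_type_py_alt
  simp only [PySem.Str.startswith_eq]
  have e1 : "Sample_".toList = "Sample".toList ++ ['_'] := by decide
  have e2 : "Protein_".toList = "Protein".toList ++ ['_'] := by decide
  have e3 : "Gene_".toList = "Gene".toList ++ ['_'] := by decide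
  have e4 : "Pathway_".toList = "Pathway".toList ++ ['_'] := by decide
  have e5 : "GO_".toList = "GO".toList ++ ['_'] := by decide
  have e6 : "Reaction_".toList = "Reaction".toList ++ ['_'] := by decide
  simp only [e1, e2, e3, e4, e5, e6]
  cases h : pvPartitionHead? s.toList with
  | none =>
    simp only [pvSw_none s h "Sample".toList (by decide), pvSw_none s h "Protein".toList (by decide),
        pvSw_none s h "Gene".toList (by decide), pvSw_none s h "Pathway".toList (by decide),
        pvSw_none s h "GO".toList (by decide), pvSw_none s h "Reaction".toList (by decide),
        Bool.false_eq_true, if_false]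
  | some head =>
    have sw := pvSw_some s head h
    by_cases h1 : "Sample".toList = head
    · rw [if_pos ((sw "Sample".toList (by decide)).mpr h1)]
      subst h1; decide
    by_cases h2 : "Protein".toList = head
    · rw [if_neg (fun hh => h1 ((sw "Sample".toList (by decide)).mp hh)), if_pos ((sw "Protein".toList (by decide)).mpr h2)]
      subst h2; decide
    by_cases h3 : "Gene".toList = head
    · rw [if_neg (fun hh => h1 ((sw "Sample".toList (by decide)).mp hh)), if_neg (fun hh => h2 ((sw "Protein".toList (by decide)).mp hh)), if_pos ((sw "Gene".toList (by decide)).mpr h3)]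
      subst h3; decide
    by_cases h4 : "Pathway".toList = head
    · rw [if_neg (fun hh => h1 ((sw "Sample".toList (by decide)).mp hh)), if_neg (fun hh => h2 ((sw "Protein".toList (by decide)).mp hh)), if_neg (fun hh => h3 ((sw "Gene".toList (by decide)).mp hh)), if_pos ((sw "Pathway".toList (by decide)).mpr h4)]
      subst h4; decide
    by_cases h5 : "GO".toList = head
    · rw [if_neg (fun hh => h1 ((sw "Sample".toList (by decide)).mp hh)), if_neg (fun hh => h2 ((sw "Protein".toList (by decide)).mp hh)), if_neg (fun hh => h3 ((sw "Gene".toList (by decide)).mp hh)), if_neg (fun hh => h4 ((sw "Pathway".toList (by decide)).mp hh)), if_pos ((sw "GO".toList (by decide)).mpr h5)]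
      subst h5; decide
    by_cases h6 : "Reaction".toList = head
    · rw [if_neg (fun hh => h1 ((sw "Sample".toList (by decide)).mp hh)), if_neg (fun hh => h2 ((sw "Protein".toList (by decide)).mp hh)), if_neg (fun hh => h3 ((sw "Gene".toList (by decide)).mp hh)), if_neg (fun hh => h4 ((sw "Pathway".toList (by decide)).mp hh)), if_neg (fun hh => h5 ((sw "GO".toList (by decide)).mp hh)), if_pos ((sw "Reaction".toList (by decide)).mpr h6)]
      subst h6; decide
    rw [if_neg (fun hh => h1 ((sw "Sample".toList (by decide)).mp hh)), if_neg (fun hh => h2 ((sw "Protein".toList (by decide)).mp hh)), if_neg (fun hh => h3 ((sw "Gene".toList (by decide)).mp hh)), if_neg (fun hh => h4 ((sw "Pathway".toList (by decide)).mp hh)), if_neg (fun hh => h5 ((sw "GO".toList (by decide)).mp hh)), if_neg (fun hh => h6 ((sw "Reaction".toList (by decide)).mp hh))]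
    have k1 : String.ofList head ≠ "Sample" := by
      exact fun hh => h1 (String.ofList_eq.mp hh).symm
    have k2 : String.ofList head ≠ "Protein" := by
      exact fun hh => h2 (String.ofList_eq.mp hh).symm
    have k3 : String.ofList head ≠ "Gene" := by
      exact fun hh => h3 (String.ofList_eq.mp hh).symm
    have k4 : String.ofList head ≠ "Pathway" := by
      exact fun hh => h4 (String.ofList_eq.mp hh).symm
    have k5 : String.ofList head ≠ "GO" := by
      exact fun hh => h5 (String.ofList_eq.mp hh).symm
    have k6 : String.ofList head ≠ "Reaction" := by
      exact fun hh => h6 (String.ofList_eq.mp hh).symm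
    simp [pvTable, PySem.Dict.getD, PySem.Dict.get?, Ne.symm k1,
          Ne.symm k2, Ne.symm k3, Ne.symm k4, Ne.symm k5, Ne.symm k6]
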